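-- pv_equiv track=rewrite | github.com/Blastz13/telegram-bot | telegram-bot/output.py | one_day_timetable
-- ===== SOURCE A (Python) =====
-- def one_day_timetable(homework):
--     row = ""
--     homework.sort(key=lambda a: a[1])
--     for i in range(0, len(homework)):
--         if i == 0:
--             row = f"------------------\n{homework[i][0]}\n" \
--                   f"{homework[i][1]}. {homework[i][2]}\n"
--             continue
--         elif homework[i][0] != homework[i - 1][0]:
--             row += f"------------------\n{homework[i][0]}\n" \
--                    f"{homework[i][1]}. {homework[i][2]}\n"
--             continue
--         row += f"{homework[i][1]}. {homework[i][2]}\n"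
--     return row
-- ===== SOURCE B (Python) =====
-- def one_day_timetable(homework):
--     homework.sort(key=lambda a: a[1])
--     return "".join(_pieces(homework))
--
--
-- def _pieces(items):
--     # one subject run per recursive step: header, then its lines
--     if not items:
--         return []
--     subj = items[0][0]
--     k = 0
--     while k < len(items) and items[k][0] == subj:
--         k += 1
--     pieces = ["------------------\n" + subj + "\n"]
--     pieces += ["{}. {}\n".format(n, t) for (_, n, t) in items[:k]]
--     return pieces + _pieces(items[k:])
-- ===== Notes on version B (the rewrite author's own statement) =====
-- stated objective: idiomatic
-- what changed: A's index loop comparing homework[i][0] with homework[i-1][0] while concatenating onto one growing string is replaced by a recursive grouping into subject runs (takeWhile/dropWhile on the sorted list) whose header and line pieces are collected in a list and joined once at the end.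
import Mathlib
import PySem

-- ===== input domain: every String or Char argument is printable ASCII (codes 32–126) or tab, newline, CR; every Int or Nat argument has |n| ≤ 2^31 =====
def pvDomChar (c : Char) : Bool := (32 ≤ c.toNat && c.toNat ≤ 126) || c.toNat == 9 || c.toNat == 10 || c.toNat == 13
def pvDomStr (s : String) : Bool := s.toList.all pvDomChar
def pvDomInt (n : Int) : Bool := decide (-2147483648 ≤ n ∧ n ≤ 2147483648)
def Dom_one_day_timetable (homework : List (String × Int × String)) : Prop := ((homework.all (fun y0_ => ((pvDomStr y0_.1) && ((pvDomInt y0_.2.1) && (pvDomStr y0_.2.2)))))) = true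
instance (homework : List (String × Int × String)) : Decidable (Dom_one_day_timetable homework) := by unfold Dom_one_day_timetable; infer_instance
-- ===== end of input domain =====

-- B replaces A's index/previous-element loop by a recursive subject-run grouping joined at the end
-- (objective: idiomatic/alternative decomposition). Both A and B sort the list argument in place in
-- Python; equivalence proved here is about the return value (the mutation is identical anyway).

-- ===== PORT A =====
-- A's loop body (the code inside 'for i in range(0, len(homework))'), kept as a named helper
def pvStepA (hw : List (String × Int × String)) (row : String) (i : Int) : String :=
  let x := PySem.List.pyGetD hw i ("", 0, "")
  if i == 0 then
    "------------------\n" ++ x.1 ++ "\n" ++ PySem.Int.toStr x.2.1 ++ ". " ++ x.2.2 ++ "\n"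
  else if x.1 != (PySem.List.pyGetD hw (i - 1) ("", 0, "")).1 then
    row ++ ("------------------\n" ++ x.1 ++ "\n" ++ PySem.Int.toStr x.2.1 ++ ". " ++ x.2.2 ++ "\n")
  else
    row ++ (PySem.Int.toStr x.2.1 ++ ". " ++ x.2.2 ++ "\n")

def one_day_timetable (homework : List (String × Int × String)) : String :=
  let hw := PySem.List.sorted homework (fun a => a.2.1)
  (PySem.List.pyRange 0 (hw.length : Int) 1).foldl (pvStepA hw) ""

-- ===== PORT B =====
def pvLine (x : String × Int × String) : String :=
  PySem.Int.toStr x.2.1 ++ ". " ++ x.2.2 ++ "\n"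

def pvHeader (s : String) : String :=
  "------------------\n" ++ s ++ "\n"

-- _pieces: the while loop counts the leading run of items with the head's subject
-- (items[:k] = takeWhile, items[k:] = dropWhile), then recurses on the rest
def pvPieces : List (String × Int × String) → List String
  | [] => []
  | x :: rest =>
      (pvHeader x.1 :: (List.takeWhile (fun y => y.1 == x.1) (x :: rest)).map pvLine)
        ++ pvPieces (List.dropWhile (fun y => y.1 == x.1) (x :: rest))
termination_by l => l.length
decreasing_by
  simp only [List.dropWhile, beq_self_eq_true]
  have := List.length_dropWhile_le (fun y => y.1 == x.1) rest
  simp only [List.length_cons]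
  omega

def one_day_timetable_alt (homework : List (String × Int × String)) : String :=
  PySem.Str.join "" (pvPieces (PySem.List.sorted homework (fun a => a.2.1)))

-- ===== PRECONDITION & SPEC =====
def Spec_one_day_timetable (homework : List (String × Int × String)) (out : String) : Prop := out = one_day_timetable_alt homework
instance (homework : List (String × Int × String)) (out : String) : Decidable (Spec_one_day_timetable homework out) := by unfold Spec_one_day_timetable; infer_instance

-- ===== CLAIM (what is proved, stated in full; the proofs are below) =====
def Claim_equal_one_day_timetable : Prop := ∀ (homework : List (String × Int × String)), Dom_one_day_timetable homework → Spec_one_day_timetable homework (one_day_timetable homework)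

-- ===== LEMMAS AND PROOFS =====

-- reference rendering: previous subject threaded as state
def pvRef : List (String × Int × String) → Option String → String
  | [], _ => ""
  | x :: rest, prev =>
      (if prev == some x.1 then pvLine x else pvHeader x.1 ++ pvLine x) ++ pvRef rest (some x.1)

theorem pv_join_nil_cons (x : String) (a : List String) :
    PySem.Str.join "" (x :: a) = x ++ PySem.Str.join "" a := by
  apply String.toList_inj.mp
  simp [PySem.Str.toList_join, PySem.Chars.join, List.intercalate]
  cases a <;> simp

theorem pv_join_nil_nil : PySem.Str.join "" ([] : List String) = "" := by
  decide

theorem pv_join_nil_append (a b : List String) :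
    PySem.Str.join "" (a ++ b) = PySem.Str.join "" a ++ PySem.Str.join "" b := by
  induction a with
  | nil => simp [pv_join_nil_nil, String.empty_append]
  | cons x xs ih =>
      simp only [List.cons_append, pv_join_nil_cons, ih, String.append_assoc]

-- pvRef over the run of a fixed subject s
theorem pvRef_run (rest : List (String × Int × String)) (s : String) :
    pvRef rest (some s) =
      PySem.Str.join "" ((List.takeWhile (fun y => y.1 == s) rest).map pvLine)
        ++ pvRef (List.dropWhile (fun y => y.1 == s) rest) none := by
  induction rest with
  | nil => simp [pvRef, pv_join_nil_nil]
  | cons y ys ih =>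
      by_cases h : y.1 = s
      · subst h
        simp only [pvRef, List.takeWhile, List.dropWhile, beq_self_eq_true,
          List.map_cons, pv_join_nil_cons, ih, String.append_assoc]
        simp
      · have hb : (y.1 == s) = false := beq_eq_false_iff_ne.mpr h
        have hb' : ((some s : Option String) == some y.1) = false := by
          simp [Ne.symm h]
        simp only [pvRef, List.takeWhile, List.dropWhile, hb, hb', Bool.false_eq_true,
          if_false, List.map_nil, pv_join_nil_nil, String.empty_append]
        rfl

-- join of B's pieces equals the reference rendering
theorem pvPieces_eq_ref (l : List (String × Int × String)) :
    PySem.Str.join "" (pvPieces l) = pvRef l none := by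
  induction l using pvPieces.induct with
  | case1 => simp [pvPieces, pvRef, pv_join_nil_nil]
  | case2 x rest ih =>
      rw [pvPieces, pv_join_nil_append, pv_join_nil_cons]
      simp only [List.takeWhile, List.dropWhile, beq_self_eq_true, List.map_cons,
        pv_join_nil_cons] at ih ⊢
      rw [ih, String.append_assoc, String.append_assoc, ← pvRef_run rest x.1]
      show pvHeader x.1 ++ (pvLine x ++ pvRef rest (some x.1)) = pvRef (x :: rest) none
      simp [pvRef, String.append_assoc]

-- last subject of pre, falling back to prev
def pvLastSubj (pre : List (String × Int × String)) (prev : Option String) : Option String :=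
  match pre.getLast? with
  | some y => some y.1
  | none => prev

theorem pvLastSubj_cons (y : String × Int × String) (ys : List (String × Int × String))
    (prev : Option String) : pvLastSubj (y :: ys) prev = pvLastSubj ys (some y.1) := by
  cases ys with
  | nil => simp [pvLastSubj]
  | cons z zs =>
      unfold pvLastSubj
      rw [List.getLast?_cons_cons]
      cases h : (z :: zs).getLast? with
      | none => simp at h
      | some w => rfl

theorem pvRef_append_singleton (pre : List (String × Int × String))
    (x : String × Int × String) (prev : Option String) :
    pvRef (pre ++ [x]) prev =
      pvRef pre prev ++
        (if pvLastSubj pre prev == some x.1 then pvLine x else pvHeader x.1 ++ pvLine x) := by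
  induction pre generalizing prev with
  | nil => simp [pvRef, pvLastSubj, String.empty_append, String.append_empty]
  | cons y ys ih =>
      simp only [List.cons_append, pvRef, ih (some y.1), String.append_assoc,
        pvLastSubj_cons]

theorem pv_loopA_eq_ref (l : List (String × Int × String)) :
    (PySem.List.pyRange 0 (l.length : Int) 1).foldl (pvStepA l) "" = pvRef l none := by
  induction l using List.reverseRecOn with
  | nil => decide
  | append_singleton pre x ih =>
      have hlen : ((pre ++ [x]).length : Int) = (pre.length : Int) + 1 := by
        simp
      rw [hlen, PySem.List.pyRange_one_succ_right (by positivity), List.foldl_append]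
      have hcongr :
          (PySem.List.pyRange 0 (pre.length : Int) 1).foldl (pvStepA (pre ++ [x])) "" =
          (PySem.List.pyRange 0 (pre.length : Int) 1).foldl (pvStepA pre) "" := by
        apply PySem.List.foldl_congr_mem
        intro acc i hi
        rw [PySem.List.mem_pyRange_one] at hi
        unfold pvStepA
        have h1 : PySem.List.pyGetD (pre ++ [x]) i ("", 0, "") =
            PySem.List.pyGetD pre i ("", 0, "") := by
          rw [PySem.List.pyGetD_eq_getElem _ _ hi.1 (by simp; omega),
              PySem.List.pyGetD_eq_getElem _ _ hi.1 (by omega : i < (pre.length : Int))]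
          exact List.getElem_append_left _
        by_cases h0 : i = 0
        · subst h0; simp [h1]
        · have h2 : PySem.List.pyGetD (pre ++ [x]) (i - 1) ("", 0, "") =
              PySem.List.pyGetD pre (i - 1) ("", 0, "") := by
            rw [PySem.List.pyGetD_eq_getElem _ _ (by omega) (by simp; omega),
                PySem.List.pyGetD_eq_getElem _ _ (by omega) (by omega : i - 1 < (pre.length : Int))]
            exact List.getElem_append_left _
          simp only [h1, h2]
      rw [hcongr, ih, pvRef_append_singleton]
      -- the final step applied at index pre.length
      unfold pvStepA
      cases hpre : pre.getLast? with
      | none =>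
          have : pre = [] := List.getLast?_eq_none_iff.mp hpre
          subst this
          simp [pvRef, pvLastSubj, PySem.List.pyGetD_zero_cons, pvHeader, pvLine,
            String.append_assoc, String.empty_append]
      | some y =>
          obtain ⟨ys, rfl⟩ := List.getLast?_eq_some_iff.mp hpre
          have hget : PySem.List.pyGetD (ys ++ [y, x]) ((ys.length : Int) + 1) ("", 0, "") = x := by
            have e : ((ys.length : Int) + 1) = (((ys.length + 1 : Nat)) : Int) := by push_cast; ring
            rw [e, PySem.List.pyGetD_natCast]
            simp
          have hne0 : ¬((ys.length : Int) + 1 = 0) := by omega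
          simp only [pvLastSubj, List.getLast?_concat]
          by_cases hxy : x.1 = y.1
          · simp [hget, hne0, hxy, pvLine, String.append_assoc]
          · simp [hget, hne0, hxy, Ne.symm hxy, pvHeader, pvLine, String.append_assoc]

-- ===== VERDICT (by name: the statement is the Claim_ definition above) =====
theorem one_day_timetable_spec : Claim_equal_one_day_timetable := by
  intro homework _
  unfold Spec_one_day_timetable one_day_timetable one_day_timetable_alt
  rw [pv_loopA_eq_ref, pvPieces_eq_ref]
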